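-- pv_equiv track=rewrite | github.com/Hunnibs/Data-Structure-Algorithm | Programmers/2020카카오인턴십_키패드누르기.py | solution
-- ===== SOURCE A (Python) =====
-- def solution(numbers, hand):
--     answer = ''
--
--     left = [4, 1]
--     right = [4, 3]
--     for num in numbers:
--         if num == 1:
--             left = [1, 1]
--             answer += 'L'
--         elif num == 4:
--             left = [2, 1]
--             answer += 'L'
--         elif num == 7:
--             left = [3, 1]
--             answer += 'L'
--         elif num == 3:
--             right = [1, 3]
--             answer += 'R'
--         elif num == 6:
--             right = [2, 3]
--             answer += 'R'
--         elif num == 9: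
--             right = [3, 3]
--             answer += 'R'
--         elif num == 2:
--             if abs(left[0] - 1) + abs(left[1] - 2) < abs(right[0] - 1) + abs(right[1] - 2):
--                 left = [1, 2]
--                 answer += 'L'
--             elif abs(left[0] - 1) + abs(left[1] - 2) > abs(right[0] - 1) + abs(right[1] - 2):
--                 right = [1, 2]
--                 answer += 'R'
--             else:
--                 if hand == 'left':
--                     left = [1, 2]
--                     answer += 'L'
--                 else:
--                     right = [1, 2]
--                     answer += 'R'
--         elif num == 5:
--             if abs(left[0] - 2) + abs(left[1] - 2) < abs(right[0] - 2) + abs(right[1] - 2):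
--                 left = [2, 2]
--                 answer += 'L'
--             elif abs(left[0] - 2) + abs(left[1] - 2) > abs(right[0] - 2) + abs(right[1] - 2):
--                 right = [2, 2]
--                 answer += 'R'
--             else:
--                 if hand == 'left':
--                     left = [2, 2]
--                     answer += 'L'
--                 else:
--                     right = [2, 2]
--                     answer += 'R'
--         elif num == 8:
--             if abs(left[0] - 3) + abs(left[1] - 2) < abs(right[0] - 3) + abs(right[1] - 2):
--                 left = [3, 2]
--                 answer += 'L'
--             elif abs(left[0] - 3) + abs(left[1] - 2) > abs(right[0] - 3) + abs(right[1] - 2):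
--                 right = [3, 2]
--                 answer += 'R'
--             else:
--                 if hand == 'left':
--                     left = [3, 2]
--                     answer += 'L'
--                 else:
--                     right = [3, 2]
--                     answer += 'R'
--         else:
--             if abs(left[0] - 4) + abs(left[1] - 2) < abs(right[0] - 4) + abs(right[1] - 2):
--                 left = [4, 2]
--                 answer += 'L'
--             elif abs(left[0] - 4) + abs(left[1] - 2) > abs(right[0] - 4) + abs(right[1] - 2):
--                 right = [4, 2]
--                 answer += 'R'
--             else:
--                 if hand == 'left':
--                     left = [4, 2]
--                     answer += 'L'
--                 else:
--                     right = [4, 2]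
--                     answer += 'R'
--
--     return answer
-- ===== SOURCE B (Python) =====
-- def solution(numbers, hand):
--     # Table-driven finite-state machine: precompute every (left, right, target) -> move
--     # transition once, then each digit is a single dict lookup.
--     def target(n):
--         return ((n - 1) // 3 + 1, (n - 1) % 3 + 1) if 1 <= n <= 9 else (4, 2)
--
--     def move(l, r, t):
--         if t[1] == 1:
--             return ('L', t, r)
--         if t[1] == 3:
--             return ('R', l, t)
--         if (abs(l[0] - t[0]) + abs(l[1] - t[1]) < abs(r[0] - t[0]) + abs(r[1] - t[1])
--                 or (abs(l[0] - t[0]) + abs(l[1] - t[1]) == abs(r[0] - t[0]) + abs(r[1] - t[1])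
--                     and hand == 'left')):
--             return ('L', t, r)
--         return ('R', l, t)
--
--     targets = [target(n) for n in range(10)]
--     lefts = [(4, 1)] + [t for t in targets if t[1] != 3]
--     rights = [(4, 3)] + [t for t in targets if t[1] != 1]
--     keys = [(l, r, t) for l in lefts for r in rights for t in targets]
--     trans = {k: move(*k) for k in keys}
--
--     out = []
--     l, r = (4, 1), (4, 3)
--     for n in numbers:
--         ch, l, r = trans[(l, r, target(n))]
--         out.append(ch)
--     return ''.join(out)
-- ===== Notes on version B (the rewrite author's own statement) =====
-- stated objective: alternative
-- what changed: Replaces A's 11-way per-digit branch chain (with the distance comparison repeated inline in four branches) by a finite-state-machine formulation: B precomputes a transition table over every reachable (left, right, target) state once, then processes each digit with a single dict lookup, collecting letters in a list joined at the end.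
import Mathlib
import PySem

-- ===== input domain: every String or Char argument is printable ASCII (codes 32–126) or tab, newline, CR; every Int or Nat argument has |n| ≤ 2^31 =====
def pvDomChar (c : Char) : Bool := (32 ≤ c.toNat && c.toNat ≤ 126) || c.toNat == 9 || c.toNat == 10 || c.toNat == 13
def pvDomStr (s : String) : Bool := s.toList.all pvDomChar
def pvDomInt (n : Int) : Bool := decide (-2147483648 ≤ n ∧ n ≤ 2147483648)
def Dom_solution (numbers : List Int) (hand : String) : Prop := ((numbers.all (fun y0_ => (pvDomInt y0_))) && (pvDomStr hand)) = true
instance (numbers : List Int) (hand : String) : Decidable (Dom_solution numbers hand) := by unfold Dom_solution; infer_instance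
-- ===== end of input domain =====

-- B replaces A's per-digit 11-way branch chain by a precomputed transition table (a dict over
-- all reachable (left, right, target) states); each digit becomes one table lookup (objective: alternative).

-- ===== PORT A =====
-- state: (answer, left thumb position, right thumb position); Python's 2-element lists become pairs
def solStepA (hand : String) (st : String × (Int × Int) × (Int × Int)) (num : Int) :
    String × (Int × Int) × (Int × Int) :=
  let ans := st.1; let left := st.2.1; let right := st.2.2
  if num = 1 then (ans ++ "L", (1, 1), right)
  else if num = 4 then (ans ++ "L", (2, 1), right)
  else if num = 7 then (ans ++ "L", (3, 1), right)
  else if num = 3 then (ans ++ "R", left, (1, 3))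
  else if num = 6 then (ans ++ "R", left, (2, 3))
  else if num = 9 then (ans ++ "R", left, (3, 3))
  else if num = 2 then
    (if |left.1 - 1| + |left.2 - 2| < |right.1 - 1| + |right.2 - 2| then (ans ++ "L", (1, 2), right)
     else if |left.1 - 1| + |left.2 - 2| > |right.1 - 1| + |right.2 - 2| then (ans ++ "R", left, (1, 2))
     else if hand = "left" then (ans ++ "L", (1, 2), right) else (ans ++ "R", left, (1, 2)))
  else if num = 5 then
    (if |left.1 - 2| + |left.2 - 2| < |right.1 - 2| + |right.2 - 2| then (ans ++ "L", (2, 2), right)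
     else if |left.1 - 2| + |left.2 - 2| > |right.1 - 2| + |right.2 - 2| then (ans ++ "R", left, (2, 2))
     else if hand = "left" then (ans ++ "L", (2, 2), right) else (ans ++ "R", left, (2, 2)))
  else if num = 8 then
    (if |left.1 - 3| + |left.2 - 2| < |right.1 - 3| + |right.2 - 2| then (ans ++ "L", (3, 2), right)
     else if |left.1 - 3| + |left.2 - 2| > |right.1 - 3| + |right.2 - 2| then (ans ++ "R", left, (3, 2))
     else if hand = "left" then (ans ++ "L", (3, 2), right) else (ans ++ "R", left, (3, 2)))
  else
    (if |left.1 - 4| + |left.2 - 2| < |right.1 - 4| + |right.2 - 2| then (ans ++ "L", (4, 2), right)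
     else if |left.1 - 4| + |left.2 - 2| > |right.1 - 4| + |right.2 - 2| then (ans ++ "R", left, (4, 2))
     else if hand = "left" then (ans ++ "L", (4, 2), right) else (ans ++ "R", left, (4, 2)))

def solution (numbers : List Int) (hand : String) : String :=
  (numbers.foldl (solStepA hand) ("", (4, 1), (4, 3))).1

-- ===== PORT B =====
-- target(n)
def solTarget (num : Int) : Int × Int :=
  if 1 ≤ num ∧ num ≤ 9 then
    (PySem.Int.floordiv (num - 1) 3 + 1, PySem.Int.mod (num - 1) 3 + 1)
  else (4, 2)

-- move(l, r, t)  ('L'/'R' kept as 1-char strings)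
def solMove (hand : String) (l r t : Int × Int) : String × (Int × Int) × (Int × Int) :=
  if t.2 = 1 then ("L", t, r)
  else if t.2 = 3 then ("R", l, t)
  else if |l.1 - t.1| + |l.2 - t.2| < |r.1 - t.1| + |r.2 - t.2| ∨
          (|l.1 - t.1| + |l.2 - t.2| = |r.1 - t.1| + |r.2 - t.2| ∧ hand = "left")
       then ("L", t, r) else ("R", l, t)

-- targets = [target(n) for n in range(10)]
def solTargets : List (Int × Int) := (PySem.List.pyRange 0 10 1).map solTarget
-- lefts / rights: every position the corresponding thumb can ever occupy
def solLefts : List (Int × Int) := (4, 1) :: solTargets.filter (fun t => t.2 != 3)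
def solRights : List (Int × Int) := (4, 3) :: solTargets.filter (fun t => t.2 != 1)
-- keys = [(l, r, t) for l in lefts for r in rights for t in targets]
def solKeys : List ((Int × Int) × (Int × Int) × (Int × Int)) :=
  solLefts.flatMap (fun l => solRights.flatMap (fun r => solTargets.map (fun t => (l, r, t))))
-- move(*k)
def solMoveK (hand : String) (k : (Int × Int) × (Int × Int) × (Int × Int)) :
    String × (Int × Int) × (Int × Int) := solMove hand k.1 k.2.1 k.2.2
-- trans = {k: move(*k) for k in keys}
def solTrans (hand : String) :
    PySem.Dict ((Int × Int) × (Int × Int) × (Int × Int)) (String × (Int × Int) × (Int × Int)) :=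
  solKeys.foldl (fun d k => d.insert k (solMoveK hand k)) PySem.Dict.empty

-- loop body: ch, l, r = trans[(l, r, target(n))]; out.append(ch)
-- (Python indexes trans with []; the key is always present by construction of keys,
--  so the total getD with a dummy default is exact here)
def solStepB (tr : PySem.Dict ((Int × Int) × (Int × Int) × (Int × Int)) (String × (Int × Int) × (Int × Int)))
    (st : List String × (Int × Int) × (Int × Int)) (n : Int) :
    List String × (Int × Int) × (Int × Int) :=
  let m := tr.getD (st.2.1, st.2.2, solTarget n) ("", (0, 0), (0, 0))
  (st.1 ++ [m.1], m.2)

def solution_alt (numbers : List Int) (hand : String) : String :=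
  let st := numbers.foldl (solStepB (solTrans hand)) ([], (4, 1), (4, 3))
  PySem.Str.join "" st.1

-- ===== PRECONDITION & SPEC =====
def Spec_solution (numbers : List Int) (hand : String) (out : String) : Prop := out = solution_alt numbers hand
instance (numbers : List Int) (hand : String) (out : String) : Decidable (Spec_solution numbers hand out) := by unfold Spec_solution; infer_instance

-- ===== CLAIM (what is proved, stated in full; the proofs are below) =====
def Claim_equal_solution : Prop := ∀ (numbers : List Int) (hand : String), Dom_solution numbers hand → Spec_solution numbers hand (solution numbers hand)

-- ===== LEMMAS AND PROOFS =====

-- a dict built by inserting f k at every k of a key list answers f k on every listed key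
theorem get?_foldl_insert_fun {κ ν : Type} [BEq κ] [LawfulBEq κ] [DecidableEq κ]
    (f : κ → ν) (ks : List κ) (d : PySem.Dict κ ν) (k : κ) :
    (ks.foldl (fun d k => d.insert k (f k)) d).get? k =
      if k ∈ ks then some (f k) else d.get? k := by
  induction ks generalizing d with
  | nil => simp
  | cons a ks ih =>
    simp only [List.foldl_cons, ih, PySem.Dict.get?_insert, List.mem_cons]
    by_cases hm : k ∈ ks <;> by_cases he : k = a <;> simp [hm, he]

theorem solTarget_mem (n : Int) : solTarget n ∈ solTargets := by
  by_cases h : 1 ≤ n ∧ n ≤ 9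
  · have : n ∈ PySem.List.pyRange 0 10 1 := by
      rw [PySem.List.mem_pyRange_one]; omega
    exact List.mem_map_of_mem this
  · have h0 : solTarget n = solTarget 0 := by simp [solTarget, h]
    rw [h0]
    exact List.mem_map_of_mem (by decide)

theorem solMove_left_sub (hand : String) (l r t : Int × Int) :
    (solMove hand l r t).2.1 = l ∨ ((solMove hand l r t).2.1 = t ∧ t.2 ≠ 3) := by
  unfold solMove
  split_ifs with h1 h2 h3
  · exact Or.inr ⟨rfl, by omega⟩
  · exact Or.inl rfl
  · exact Or.inr ⟨rfl, h2⟩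
  · exact Or.inl rfl

theorem solMove_right_sub (hand : String) (l r t : Int × Int) :
    (solMove hand l r t).2.2 = r ∨ ((solMove hand l r t).2.2 = t ∧ t.2 ≠ 1) := by
  unfold solMove
  split_ifs with h1 h2 h3
  · exact Or.inl rfl
  · exact Or.inr ⟨rfl, by omega⟩
  · exact Or.inl rfl
  · exact Or.inr ⟨rfl, h1⟩

theorem solMove_left_mem (hand : String) (l r t : Int × Int)
    (hl : l ∈ solLefts) (ht : t ∈ solTargets) : (solMove hand l r t).2.1 ∈ solLefts := by
  rcases solMove_left_sub hand l r t with h | ⟨h, hne⟩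
  · rwa [h]
  · rw [h]
    exact List.mem_cons_of_mem _ (List.mem_filter.mpr ⟨ht, by simpa using hne⟩)

theorem solMove_right_mem (hand : String) (l r t : Int × Int)
    (hr : r ∈ solRights) (ht : t ∈ solTargets) : (solMove hand l r t).2.2 ∈ solRights := by
  rcases solMove_right_sub hand l r t with h | ⟨h, hne⟩
  · rwa [h]
  · rw [h]
    exact List.mem_cons_of_mem _ (List.mem_filter.mpr ⟨ht, by simpa using hne⟩)

theorem solKey_mem (l r t : Int × Int) (hl : l ∈ solLefts) (hr : r ∈ solRights)
    (ht : t ∈ solTargets) : (l, r, t) ∈ solKeys := by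
  unfold solKeys
  exact List.mem_flatMap.mpr ⟨l, hl, List.mem_flatMap.mpr ⟨r, hr, List.mem_map_of_mem ht⟩⟩

theorem solTrans_get (hand : String) (l r t : Int × Int) (hl : l ∈ solLefts)
    (hr : r ∈ solRights) (ht : t ∈ solTargets) :
    (solTrans hand).getD (l, r, t) ("", (0, 0), (0, 0)) = solMove hand l r t := by
  rw [PySem.Dict.getD_eq_get?_getD]
  unfold solTrans
  rw [get?_foldl_insert_fun (solMoveK hand)]
  simp [solKey_mem l r t hl hr ht, solMoveK]

-- A's 11-way branch step is exactly "append the move's letter, take the move's new hands"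
set_option maxHeartbeats 1000000 in
theorem solStepA_eq_move (hand : String) (ans : String) (l r : Int × Int) (num : Int) :
    solStepA hand (ans, l, r) num =
      (ans ++ (solMove hand l r (solTarget num)).1, (solMove hand l r (solTarget num)).2) := by
  by_cases h1 : num = 1 <;> by_cases h2 : num = 2 <;> by_cases h3 : num = 3 <;>
  by_cases h4 : num = 4 <;> by_cases h5 : num = 5 <;> by_cases h6 : num = 6 <;>
  by_cases h7 : num = 7 <;> by_cases h8 : num = 8 <;> by_cases h9 : num = 9 <;>
  simp_all [solStepA, solMove, solTarget, PySem.Int.floordiv, PySem.Int.mod] <;>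
  first
  | rfl
  | (split_ifs <;> simp_all <;> omega)

-- B's fold only appends to the out list: the accumulator is a prefix
theorem solFoldB_prefix (tr) (ns : List Int) (o : List String) (p : (Int × Int) × (Int × Int)) :
    ns.foldl (solStepB tr) (o, p) =
      (o ++ (ns.foldl (solStepB tr) ([], p)).1, (ns.foldl (solStepB tr) ([], p)).2) := by
  induction ns generalizing o p with
  | nil => simp
  | cons n ns ih =>
    simp only [List.foldl_cons, solStepB, List.nil_append]
    rw [ih (o ++ [(tr.getD (p.1, p.2, solTarget n) ("", (0, 0), (0, 0))).1]) _,
        ih [(tr.getD (p.1, p.2, solTarget n) ("", (0, 0), (0, 0))).1] _]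
    simp [List.append_assoc]

theorem join_empty_nil : PySem.Str.join "" ([] : List String) = "" := rfl

set_option maxHeartbeats 1000000 in
theorem chars_join_empty_cons (a : List Char) (l : List (List Char)) :
    PySem.Chars.join [] (a :: l) = a ++ PySem.Chars.join [] l := by
  cases l <;> simp [pysem]

set_option maxHeartbeats 1000000 in
theorem join_empty_cons (s : String) (l : List String) :
    PySem.Str.join "" (s :: l) = s ++ PySem.Str.join "" l := by
  simp only [PySem.Str.join, List.map_cons]
  rw [show ("" : String).toList = [] from rfl, chars_join_empty_cons]
  simp

-- main invariant: from any reachable pair of hand positions, A's fold is B's fold with the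
-- letters joined onto A's accumulated answer
set_option maxHeartbeats 1000000 in
theorem sol_fold_eq (hand : String) (ns : List Int) :
    ∀ (ans : String) (l r : Int × Int), l ∈ solLefts → r ∈ solRights →
      ns.foldl (solStepA hand) (ans, l, r) =
        (ans ++ PySem.Str.join "" (ns.foldl (solStepB (solTrans hand)) ([], l, r)).1,
         (ns.foldl (solStepB (solTrans hand)) ([], l, r)).2) := by
  induction ns with
  | nil => intro ans l r _ _; simp [join_empty_nil]
  | cons n ns ih =>
    intro ans l r hl hr
    have ht := solTarget_mem n
    have hget := solTrans_get hand l r (solTarget n) hl hr ht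
    have hstep : solStepB (solTrans hand) ([], l, r) n =
        ([(solMove hand l r (solTarget n)).1], (solMove hand l r (solTarget n)).2) := by
      dsimp only [solStepB]
      rw [hget]
      simp
    simp only [List.foldl_cons, solStepA_eq_move, hstep]
    rw [ih _ _ _ (solMove_left_mem hand l r _ hl ht) (solMove_right_mem hand l r _ hr ht),
      solFoldB_prefix _ ns [(solMove hand l r (solTarget n)).1]]
    simp [join_empty_cons, String.append_assoc]

-- ===== VERDICT (by name: the statement is the Claim_ definition above) =====
theorem solution_spec : Claim_equal_solution := by
  intro numbers hand _
  unfold Spec_solution solution solution_alt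
  rw [sol_fold_eq hand numbers "" (4, 1) (4, 3) (by decide) (by decide)]
  simp
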